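-- pv_equiv track=rewrite | github.com/thijsjanzen/ROBIN | scripts/hdf5_operations.py | get_contig_indices
-- ===== SOURCE A (Python) =====
-- def get_contig_indices(array, element, prev_index):
--     output = []
--     for i in range(prev_index, len(array)):
--         if array[i] == element:
--             output.append(i)
--         else:
--             if len(output) > 0:
--                 break
--     return output
-- ===== SOURCE B (Python) =====
-- def get_contig_indices(array, element, prev_index):
--     # Materialize a boolean match-mask for the scanned index window, then locate the
--     # run boundaries with list.index instead of scanning with an explicit loop.
--     flags = [array[i] == element for i in range(prev_index, len(array))]
--     s = flags.index(True) if True in flags else len(flags)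
--     e = s + flags[s:].index(False) if False in flags[s:] else len(flags)
--     return list(range(prev_index + s, prev_index + e))
-- ===== Notes on version B (the rewrite author's own statement) =====
-- stated objective: alternative
-- what changed: Instead of A's single stateful append-and-break scan, B materializes a boolean match-mask over the index window and derives the run boundaries with membership tests and list.index, returning list(range(start, end)).
import Mathlib
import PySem

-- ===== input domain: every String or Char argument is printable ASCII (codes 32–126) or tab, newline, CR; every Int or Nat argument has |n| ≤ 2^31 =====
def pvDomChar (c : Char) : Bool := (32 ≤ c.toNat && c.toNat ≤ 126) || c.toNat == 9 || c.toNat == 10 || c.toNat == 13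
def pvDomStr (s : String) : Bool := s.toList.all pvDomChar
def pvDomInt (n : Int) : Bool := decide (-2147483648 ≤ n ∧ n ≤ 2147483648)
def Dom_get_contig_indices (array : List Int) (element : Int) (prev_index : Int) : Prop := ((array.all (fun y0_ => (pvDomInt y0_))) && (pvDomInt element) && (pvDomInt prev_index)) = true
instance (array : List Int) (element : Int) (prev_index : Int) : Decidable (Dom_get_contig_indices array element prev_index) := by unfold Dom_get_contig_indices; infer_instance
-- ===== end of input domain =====

-- B replaces A's single stateful append-and-break pass with a boolean match-mask over the
-- index window, run boundaries found via list.index, result built as list(range(start, end));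
-- alternative decomposition, same O(n) cost.


-- ===== PORT A =====
-- A's loop over range(prev_index, len(array)) with append/break, as structural recursion
-- over the index list; array[i] is PySem.List.pyGet? (Pre_ guarantees every visited index is
-- in range, so .getD 0 never supplies the default on admitted inputs).
def goA (array : List Int) (element : Int) : List Int → List Int → List Int
  | acc, [] => acc
  | acc, i :: rest =>
    if (PySem.List.pyGet? array i).getD 0 = element then
      goA array element (acc ++ [i]) rest
    else if acc.length > 0 then acc
    else goA array element acc rest

def get_contig_indices (array : List Int) (element : Int) (prev_index : Int) : List Int :=
  goA array element [] (PySem.List.pyRange prev_index (array.length : Int) 1)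

-- ===== PORT B =====
-- the comprehension '[array[i] == element for i in range(lo, len(array))]'
def pvFlags (array : List Int) (element : Int) (lo : Int) : List Bool :=
  (PySem.List.pyRange lo (array.length : Int) 1).map
    (fun i => decide ((PySem.List.pyGet? array i).getD 0 = element))

def get_contig_indices_alt (array : List Int) (element : Int) (prev_index : Int) : List Int :=
  let flags := pvFlags array element prev_index
  -- s = flags.index(True) if True in flags else len(flags)
  let s : Int := if true ∈ flags then (((PySem.List.index? flags true).getD 0 : Nat) : Int) else (flags.length : Int)
  -- flags[s:]
  let tail := PySem.List.slice flags (some s) none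
  -- e = s + flags[s:].index(False) if False in flags[s:] else len(flags)
  let e : Int := if false ∈ tail then s + (((PySem.List.index? tail false).getD 0 : Nat) : Int) else (flags.length : Int)
  PySem.List.pyRange (prev_index + s) (prev_index + e) 1

-- ===== PRECONDITION & SPEC =====
-- Pre_ excludes exactly the inputs where Python A raises IndexError: prev_index < -len(array)
-- (the first iteration already indexes out of range there); B raises identically in Python.
def Pre_get_contig_indices (array : List Int) (element : Int) (prev_index : Int) : Prop :=
  -(array.length : Int) ≤ prev_index
instance (array : List Int) (element : Int) (prev_index : Int) : Decidable (Pre_get_contig_indices array element prev_index) := by unfold Pre_get_contig_indices; infer_instance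

def pvWitness_get_contig_indices : List Int × Int × Int := ([1, 2, 2, 3], 2, 0)

def Spec_get_contig_indices (array : List Int) (element : Int) (prev_index : Int) (out : List Int) : Prop := out = get_contig_indices_alt array element prev_index
instance (array : List Int) (element : Int) (prev_index : Int) (out : List Int) : Decidable (Spec_get_contig_indices array element prev_index out) := by unfold Spec_get_contig_indices; infer_instance

-- ===== CLAIM (what is proved, stated in full; the proofs are below) =====
def Claim_equal_get_contig_indices : Prop := ∀ (array : List Int) (element : Int) (prev_index : Int), Dom_get_contig_indices array element prev_index → Pre_get_contig_indices array element prev_index → Spec_get_contig_indices array element prev_index (get_contig_indices array element prev_index)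

-- ===== LEMMAS AND PROOFS =====

-- proof-only helpers: the run start / run end pointers both programs are characterized by
def findStart (array : List Int) (element : Int) : Nat → Int → Int
  | 0, s => s
  | fuel + 1, s =>
    if (PySem.List.pyGet? array s).getD 0 = element then s
    else findStart array element fuel (s + 1)

def findEnd (array : List Int) (element : Int) : Nat → Int → Int
  | 0, s => s
  | fuel + 1, s =>
    if (PySem.List.pyGet? array s).getD 0 = element then findEnd array element fuel (s + 1)
    else s

theorem findEnd_ge (array : List Int) (element : Int) :
    ∀ (fuel : Nat) (s : Int), s ≤ findEnd array element fuel s := by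
  intro fuel
  induction fuel with
  | zero => intro s; simp [findEnd]
  | succ k ih =>
    intro s
    simp only [findEnd]
    split
    · exact le_trans (by omega) (ih (s + 1))
    · exact le_refl s

-- Phase 2 of A (acc nonempty): collect while equal, break on first mismatch = pyRange up to findEnd.
theorem goA_phase2 (array : List Int) (element : Int) :
    ∀ (fuel : Nat) (s : Int) (acc : List Int), fuel = ((array.length : Int) - s).toNat →
      acc ≠ [] →
      goA array element acc (PySem.List.pyRange s (array.length : Int) 1) =
        acc ++ PySem.List.pyRange s (findEnd array element fuel s) 1 := by
  intro fuel
  induction fuel with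
  | zero =>
    intro s acc hf _
    have hns : (array.length : Int) ≤ s := by omega
    rw [PySem.List.pyRange_one_eq_nil hns, findEnd, PySem.List.pyRange_one_eq_nil (le_refl s)]
    simp [goA]
  | succ k ih =>
    intro s acc hf hacc
    have hs : s < (array.length : Int) := by omega
    rw [PySem.List.pyRange_one_cons hs]
    simp only [goA, findEnd]
    by_cases h : (PySem.List.pyGet? array s).getD 0 = element
    · simp only [h, if_true]
      rw [ih (s + 1) (acc ++ [s]) (by omega) (by simp)]
      have hE : s < findEnd array element k (s + 1) :=
        lt_of_lt_of_le (by omega) (findEnd_ge array element k (s + 1))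
      rw [PySem.List.pyRange_one_cons hE]
      simp
    · simp only [h, if_false]
      have : acc.length > 0 := List.length_pos_iff.mpr hacc
      rw [if_pos this, PySem.List.pyRange_one_eq_nil (le_refl s)]
      simp

-- Phase 1 of A (acc = []): skip while unequal = findStart, then phase 2 from the run start.
theorem goA_phase1 (array : List Int) (element : Int) :
    ∀ (fuel : Nat) (s : Int), fuel = ((array.length : Int) - s).toNat →
      goA array element [] (PySem.List.pyRange s (array.length : Int) 1) =
        PySem.List.pyRange (findStart array element fuel s)
          (findEnd array element
            ((array.length : Int) - findStart array element fuel s).toNat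
            (findStart array element fuel s)) 1 := by
  intro fuel
  induction fuel with
  | zero =>
    intro s hf
    have hns : (array.length : Int) ≤ s := by omega
    rw [PySem.List.pyRange_one_eq_nil hns]
    simp only [goA, findStart]
    have : ((array.length : Int) - s).toNat = 0 := by omega
    rw [this, findEnd, PySem.List.pyRange_one_eq_nil (le_refl s)]
  | succ k ih =>
    intro s hf
    have hs : s < (array.length : Int) := by omega
    rw [PySem.List.pyRange_one_cons hs]
    simp only [goA, findStart]
    by_cases h : (PySem.List.pyGet? array s).getD 0 = element
    · simp only [h, if_true]
      rw [show ([] : List Int) ++ [s] = [s] from rfl,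
        goA_phase2 array element k (s + 1) [s] (by omega) (by simp)]
      have hfs : ((array.length : Int) - s).toNat = k + 1 := by omega
      rw [hfs]
      simp only [findEnd, h, if_true]
      have hE : s < findEnd array element k (s + 1) :=
        lt_of_lt_of_le (by omega) (findEnd_ge array element k (s + 1))
      rw [PySem.List.pyRange_one_cons hE]
      simp
    · simp only [h, if_false, List.length_nil, gt_iff_lt, lt_self_iff_false, if_false]
      exact ih (s + 1) (by omega)

-- dropping k indices from a step-1 range shifts its start by k
theorem drop_pyRange (b : Int) :
    ∀ (k : Nat) (a : Int), (PySem.List.pyRange a b 1).drop k = PySem.List.pyRange (a + k) b 1 := by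
  intro k
  induction k with
  | zero => intro a; simp
  | succ m ih =>
    intro a
    by_cases h : a < b
    · rw [PySem.List.pyRange_one_cons h]
      simp only [List.drop_succ_cons]
      rw [ih (a + 1)]
      congr 1
      push_cast
      ring
    · rw [PySem.List.pyRange_one_eq_nil (by omega), PySem.List.pyRange_one_eq_nil (by omega)]
      simp

-- mask structure: empty past the end, cons otherwise
theorem pvFlags_nil (array : List Int) (element : Int) (s : Int)
    (h : (array.length : Int) ≤ s) : pvFlags array element s = [] := by
  unfold pvFlags
  rw [PySem.List.pyRange_one_eq_nil h]
  rfl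

theorem pvFlags_cons (array : List Int) (element : Int) (s : Int)
    (h : s < (array.length : Int)) :
    pvFlags array element s =
      decide ((PySem.List.pyGet? array s).getD 0 = element) :: pvFlags array element (s + 1) := by
  unfold pvFlags
  rw [PySem.List.pyRange_one_cons h]
  rfl

-- findStart = start + (index of the first True in the mask, or the mask length)
theorem findStart_eq (array : List Int) (element : Int) :
    ∀ (fuel : Nat) (s : Int), fuel = ((array.length : Int) - s).toNat →
      findStart array element fuel s =
        s + (if true ∈ pvFlags array element s
             then (((PySem.List.index? (pvFlags array element s) true).getD 0 : Nat) : Int)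
             else ((pvFlags array element s).length : Int)) := by
  intro fuel
  induction fuel with
  | zero =>
    intro s hf
    rw [pvFlags_nil array element s (by omega)]
    simp [findStart]
  | succ k ih =>
    intro s hf
    have hs : s < (array.length : Int) := by omega
    rw [pvFlags_cons array element s hs]
    simp only [findStart]
    by_cases h : (PySem.List.pyGet? array s).getD 0 = element
    · simp only [h, if_true, decide_true]
      rw [PySem.List.index?_cons_self]
      simp
    · simp only [h, if_false, decide_false]
      rw [ih (s + 1) (by omega)]
      rw [PySem.List.index?_cons_of_ne (pvFlags array element (s + 1)) (show (false : Bool) ≠ true by decide)]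
      by_cases hm : true ∈ pvFlags array element (s + 1)
      · obtain ⟨j, hj⟩ := Option.isSome_iff_exists.mp
          ((PySem.List.index?_isSome_iff _ _).mpr hm)
        simp only [List.mem_cons, hm, if_true, hj,
          Option.map_some, Option.getD_some]
        simp
        omega
      · simp only [List.mem_cons, hm, if_false,
          List.length_cons]
        simp
        omega

-- findEnd = start + (index of the first False in the mask, or the mask length)
theorem findEnd_eq (array : List Int) (element : Int) :
    ∀ (fuel : Nat) (s : Int), fuel = ((array.length : Int) - s).toNat →
      findEnd array element fuel s =
        s + (if false ∈ pvFlags array element s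
             then (((PySem.List.index? (pvFlags array element s) false).getD 0 : Nat) : Int)
             else ((pvFlags array element s).length : Int)) := by
  intro fuel
  induction fuel with
  | zero =>
    intro s hf
    rw [pvFlags_nil array element s (by omega)]
    simp [findEnd]
  | succ k ih =>
    intro s hf
    have hs : s < (array.length : Int) := by omega
    rw [pvFlags_cons array element s hs]
    simp only [findEnd]
    by_cases h : (PySem.List.pyGet? array s).getD 0 = element
    · simp only [h, if_true, decide_true]
      rw [ih (s + 1) (by omega)]
      rw [PySem.List.index?_cons_of_ne (pvFlags array element (s + 1)) (show (true : Bool) ≠ false by decide)]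
      by_cases hm : false ∈ pvFlags array element (s + 1)
      · obtain ⟨j, hj⟩ := Option.isSome_iff_exists.mp
          ((PySem.List.index?_isSome_iff _ _).mpr hm)
        simp only [List.mem_cons, hm, if_true, hj,
          Option.map_some, Option.getD_some]
        simp
        omega
      · simp only [List.mem_cons, hm, if_false,
          List.length_cons]
        simp
        omega
    · simp only [h, if_false, decide_false]
      rw [PySem.List.index?_cons_self]
      simp

-- the index returned by list.index never exceeds the list length
theorem index_getD_le {α : Type} [DecidableEq α] (xs : List α) (v : α) :
    ((PySem.List.index? xs v).getD 0 : Nat) ≤ xs.length := by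
  cases hj : PySem.List.index? xs v with
  | none => simp
  | some j =>
    obtain ⟨hk, -, -⟩ := PySem.List.getElem_of_index?_eq_some hj
    simp [Nat.le_of_lt hk]

-- ===== VERDICT (by name: the statement is the Claim_ definition above) =====
theorem get_contig_indices_spec : Claim_equal_get_contig_indices := by
  intro array element prev_index _ _
  unfold Spec_get_contig_indices get_contig_indices get_contig_indices_alt
  rw [goA_phase1 array element ((array.length : Int) - prev_index).toNat prev_index rfl]
  simp only []
  set flags := pvFlags array element prev_index with hflags
  set sB : Int := if true ∈ flags
      then (((PySem.List.index? flags true).getD 0 : Nat) : Int)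
      else ((flags.length : Int)) with hsB
  have hsB_nonneg : 0 ≤ sB := by
    rw [hsB]; split_ifs <;> exact Int.natCast_nonneg _
  have hsB_le : sB ≤ (flags.length : Int) := by
    rw [hsB]; split_ifs
    · exact_mod_cast index_getD_le flags true
    · exact le_refl _
  have hS : findStart array element ((array.length : Int) - prev_index).toNat prev_index
      = prev_index + sB :=
    findStart_eq array element _ prev_index rfl
  have htail : PySem.List.slice flags (some sB) none = pvFlags array element (prev_index + sB) := by
    rw [PySem.List.slice_from flags hsB_nonneg, hflags]
    unfold pvFlags
    rw [← List.map_drop, drop_pyRange]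
    have : prev_index + (sB.toNat : Int) = prev_index + sB := by omega
    rw [this]
  rw [htail]
  have hE : findEnd array element
        ((array.length : Int) - (prev_index + sB)).toNat (prev_index + sB)
      = prev_index + (if false ∈ pvFlags array element (prev_index + sB)
          then sB + (((PySem.List.index? (pvFlags array element (prev_index + sB)) false).getD 0 : Nat) : Int)
          else ((flags.length : Int))) := by
    rw [findEnd_eq array element _ (prev_index + sB) rfl]
    by_cases hm : false ∈ pvFlags array element (prev_index + sB)
    · simp only [hm, if_true]; ring
    · simp only [hm, if_false]
      have hlen : ((pvFlags array element (prev_index + sB)).length : Int)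
          = (flags.length : Int) - sB := by
        rw [← htail, PySem.List.slice_from flags hsB_nonneg, List.length_drop]
        omega
      rw [hlen]; ring
  rw [hS, hE]
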